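-- pv_equiv track=rewrite | github.com/ho2300023/py | Steganography app.py | encode_to_binary
-- ===== SOURCE A (Python) =====
-- def encode_to_binary(data): #Changes string to binary.
--
--     binary_msg=""     #Creates an empty string to store the binary number of the input data.
--     for letter in data:   #Iterates through each character in the string.
--         ascii_val=ord(letter) #Converts the character to its ASCII valu.
--         bin=""      #I defined bin and created an empty string
--         while ascii_val>0:      # While loops on each character until the ASCII value is fully converted to binary.
--             remainder=ascii_val%2 #calculates the remainder when dividing the ASCII value by 2(binary).
--             bin=str(remainder)+bin #The rest of the binary string we add to it the calculated binary digit
--             ascii_val=ascii_val//2 #I divided the integer to move to the next binary number.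
--         binary_msg+=bin.zfill(8)    #Ensures each byte is exactly 8 bits.
--     return binary_msg
-- ===== SOURCE B (Python) =====
-- def encode_to_binary(data):
--     # Same result, but via the library's closed-form binary formatting
--     # instead of a manual repeated-division bit loop.
--     return ''.join(format(ord(letter), '08b') for letter in data)
-- ===== Notes on version B (the rewrite author's own statement) =====
-- stated objective: idiomatic
-- what changed: The manual modulo/floor-division while-loop that accumulates bits one at a time is replaced by the library's closed-form zero-padded 8-wide binary formatting of each character code, joined in one pass.
import Mathlib
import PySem

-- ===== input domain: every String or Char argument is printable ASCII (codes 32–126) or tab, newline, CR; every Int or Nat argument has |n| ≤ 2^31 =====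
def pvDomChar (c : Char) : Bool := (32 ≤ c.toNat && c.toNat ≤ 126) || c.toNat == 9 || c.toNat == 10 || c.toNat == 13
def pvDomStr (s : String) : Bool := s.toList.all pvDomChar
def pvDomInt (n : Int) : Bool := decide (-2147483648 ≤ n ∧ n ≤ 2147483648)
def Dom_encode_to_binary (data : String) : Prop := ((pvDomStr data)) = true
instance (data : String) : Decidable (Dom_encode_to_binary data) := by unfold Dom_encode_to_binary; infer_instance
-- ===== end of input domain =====

-- B replaces A's manual modulo/floor-division bit loop with the library's
-- closed-form binary formatting (format(ord(c), '08b')), joined in one pass (idiomatic).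


-- ===== PORT A =====
-- inner while-loop: while ascii_val > 0: bin = str(ascii_val % 2) + bin; ascii_val = ascii_val // 2
-- (ascii_val = ord(letter) is a nonnegative int, so Nat's % and / coincide with Python's)
-- fuel (= v) only makes the recursion total; v/2 < v so it never runs out
def pvBinGo : Nat → Nat → List Char → List Char
  | 0, _, bin => bin
  | fuel + 1, v, bin =>
    if v > 0 then pvBinGo fuel (v / 2) (PySem.Int.toChars ((v : Int) % 2) ++ bin) else bin

def pvBinLoop (v : Nat) (bin : List Char) : List Char := pvBinGo v v bin

def encode_to_binary (data : String) : String :=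
  String.ofList (data.toList.foldl
    (fun binary_msg letter => binary_msg ++ PySem.Chars.zfill (pvBinLoop letter.toNat []) 8) [])

-- ===== PORT B =====
def encode_to_binary_alt (data : String) : String :=
  String.ofList ((data.toList.map
    (fun letter => PySem.Chars.zfill (PySem.Int.toBinChars (letter.toNat : Int)) 8)).flatten)

-- ===== PRECONDITION & SPEC =====
def Spec_encode_to_binary (data : String) (out : String) : Prop := out = encode_to_binary_alt data
instance (data : String) (out : String) : Decidable (Spec_encode_to_binary data out) := by unfold Spec_encode_to_binary; infer_instance

-- ===== CLAIM (what is proved, stated in full; the proofs are below) =====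
def Claim_equal_encode_to_binary : Prop := ∀ (data : String), Dom_encode_to_binary data → Spec_encode_to_binary data (encode_to_binary data)

-- ===== LEMMAS AND PROOFS =====
-- For every ASCII code in the domain, A's hand-rolled bit string (zfilled) equals format(n, '08b').
theorem pv_perchar : ∀ n : Nat, n < 127 →
    PySem.Chars.zfill (pvBinLoop n []) 8 = PySem.Chars.zfill (PySem.Int.toBinChars (n : Int)) 8 := by
  decide

theorem encode_to_binary_spec : Claim_equal_encode_to_binary := by
  intro data hdom
  unfold Spec_encode_to_binary encode_to_binary encode_to_binary_alt
  rw [PySem.List.foldl_append_eq_flatMap, List.flatMap_def, List.nil_append]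
  refine congrArg String.ofList (congrArg List.flatten (List.map_congr_left ?_))
  intro c hc
  have hd : pvDomChar c = true := by
    have := List.all_eq_true.mp hdom c hc
    exact this
  have hlt : c.toNat < 127 := by
    simp only [pvDomChar, Bool.or_eq_true, Bool.and_eq_true, decide_eq_true_eq, beq_iff_eq] at hd
    omega
  exact pv_perchar c.toNat hlt
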